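-- pv_equiv track=rewrite | github.com/bducraux/ia-invest | mcp_server/http_api.py | _portfolio_specialization
-- ===== SOURCE A (Python) =====
-- def _portfolio_specialization(allowed_asset_types: list[str]) -> str:
--     normalized = {asset_type.strip().lower() for asset_type in allowed_asset_types}
--     if not normalized:
--         return "GENERIC"
--     if normalized <= {"cdb", "lci", "lca", "bond", "treasury"}:
--         return "RENDA_FIXA"
--     if normalized <= {"previdencia"}:
--         return "PREVIDENCIA"
--     if normalized <= {"stock", "fii", "etf", "bdr"}:
--         return "RENDA_VARIAVEL"
--     if normalized <= {"crypto"}: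
--         return "CRIPTO"
--     if normalized <= {"stock_us", "etf_us", "reit_us", "bdr_us"}:
--         return "INTERNACIONAL"
--     return "GENERIC"
-- ===== SOURCE B (Python) =====
-- _CATEGORY = {
--     "cdb": "RENDA_FIXA", "lci": "RENDA_FIXA", "lca": "RENDA_FIXA",
--     "bond": "RENDA_FIXA", "treasury": "RENDA_FIXA",
--     "previdencia": "PREVIDENCIA",
--     "stock": "RENDA_VARIAVEL", "fii": "RENDA_VARIAVEL",
--     "etf": "RENDA_VARIAVEL", "bdr": "RENDA_VARIAVEL",
--     "crypto": "CRIPTO",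
--     "stock_us": "INTERNACIONAL", "etf_us": "INTERNACIONAL",
--     "reit_us": "INTERNACIONAL", "bdr_us": "INTERNACIONAL",
-- }
--
--
-- def _portfolio_specialization(allowed_asset_types: list[str]) -> str:
--     categories = {_CATEGORY.get(t.strip().lower(), "GENERIC")
--                   for t in allowed_asset_types}
--     if len(categories) == 1:
--         return categories.pop()
--     return "GENERIC"
-- ===== Notes on version B (the rewrite author's own statement) =====
-- stated objective: simpler
-- what changed: Replaced the five ordered subset tests against hard-coded sets by a single type-to-category lookup table and one uniformity check: map every normalized type to its category and return the sole category if there is exactly one, else GENERIC.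
import Mathlib
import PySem

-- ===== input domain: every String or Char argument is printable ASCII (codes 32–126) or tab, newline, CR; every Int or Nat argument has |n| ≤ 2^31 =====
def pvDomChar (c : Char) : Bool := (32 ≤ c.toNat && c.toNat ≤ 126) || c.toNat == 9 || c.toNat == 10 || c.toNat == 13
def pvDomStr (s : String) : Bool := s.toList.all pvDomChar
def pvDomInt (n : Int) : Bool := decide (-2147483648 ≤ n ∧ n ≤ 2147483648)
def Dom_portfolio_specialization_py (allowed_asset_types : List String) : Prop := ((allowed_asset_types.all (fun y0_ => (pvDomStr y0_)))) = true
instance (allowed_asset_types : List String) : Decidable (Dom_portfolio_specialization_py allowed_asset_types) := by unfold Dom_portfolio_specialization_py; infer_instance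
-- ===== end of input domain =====

-- B replaces A's five ordered subset tests by one type→category lookup table plus a uniqueness check (objective: simpler).


-- ===== PORT A =====
def portfolio_specialization_py (allowed_asset_types : List String) : String :=
  let normalized : PySem.Set String :=
    PySem.Set.ofList (allowed_asset_types.map (fun t => PySem.Str.lower (PySem.Str.strip t)))
  if normalized.isEmpty then "GENERIC"
  else if PySem.Set.issubset normalized (PySem.Set.ofList ["cdb", "lci", "lca", "bond", "treasury"]) then "RENDA_FIXA"
  else if PySem.Set.issubset normalized (PySem.Set.ofList ["previdencia"]) then "PREVIDENCIA"
  else if PySem.Set.issubset normalized (PySem.Set.ofList ["stock", "fii", "etf", "bdr"]) then "RENDA_VARIAVEL"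
  else if PySem.Set.issubset normalized (PySem.Set.ofList ["crypto"]) then "CRIPTO"
  else if PySem.Set.issubset normalized (PySem.Set.ofList ["stock_us", "etf_us", "reit_us", "bdr_us"]) then "INTERNACIONAL"
  else "GENERIC"

-- ===== PORT B =====
def pvCatTable : PySem.Dict String String :=
  PySem.Dict.ofList [("cdb", "RENDA_FIXA"), ("lci", "RENDA_FIXA"), ("lca", "RENDA_FIXA"),
    ("bond", "RENDA_FIXA"), ("treasury", "RENDA_FIXA"),
    ("previdencia", "PREVIDENCIA"),
    ("stock", "RENDA_VARIAVEL"), ("fii", "RENDA_VARIAVEL"),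
    ("etf", "RENDA_VARIAVEL"), ("bdr", "RENDA_VARIAVEL"),
    ("crypto", "CRIPTO"),
    ("stock_us", "INTERNACIONAL"), ("etf_us", "INTERNACIONAL"),
    ("reit_us", "INTERNACIONAL"), ("bdr_us", "INTERNACIONAL")]

def portfolio_specialization_py_alt (allowed_asset_types : List String) : String :=
  let categories : PySem.Set String :=
    PySem.Set.ofList (allowed_asset_types.map
      (fun t => pvCatTable.getD (PySem.Str.lower (PySem.Str.strip t)) "GENERIC"))
  match categories with
  | [c] => c
  | _ => "GENERIC"

-- ===== PRECONDITION & SPEC =====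
def Spec_portfolio_specialization_py (allowed_asset_types : List String) (out : String) : Prop := out = portfolio_specialization_py_alt allowed_asset_types
instance (allowed_asset_types : List String) (out : String) : Decidable (Spec_portfolio_specialization_py allowed_asset_types out) := by unfold Spec_portfolio_specialization_py; infer_instance

-- ===== CLAIM (what is proved, stated in full; the proofs are below) =====
def Claim_equal_portfolio_specialization_py : Prop := ∀ (allowed_asset_types : List String), Dom_portfolio_specialization_py allowed_asset_types → Spec_portfolio_specialization_py allowed_asset_types (portfolio_specialization_py allowed_asset_types)

-- ===== LEMMAS AND PROOFS =====

set_option maxHeartbeats 2000000 in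
set_option maxRecDepth 10000 in
theorem pvCatTable_mk : pvCatTable = PySem.Dict.mk [("cdb", "RENDA_FIXA"), ("lci", "RENDA_FIXA"), ("lca", "RENDA_FIXA"),
    ("bond", "RENDA_FIXA"), ("treasury", "RENDA_FIXA"),
    ("previdencia", "PREVIDENCIA"),
    ("stock", "RENDA_VARIAVEL"), ("fii", "RENDA_VARIAVEL"),
    ("etf", "RENDA_VARIAVEL"), ("bdr", "RENDA_VARIAVEL"),
    ("crypto", "CRIPTO"),
    ("stock_us", "INTERNACIONAL"), ("etf_us", "INTERNACIONAL"),
    ("reit_us", "INTERNACIONAL"), ("bdr_us", "INTERNACIONAL")] := by decide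

-- the table lookup, characterised as a plain conditional on the key
set_option maxHeartbeats 4000000 in
set_option maxRecDepth 10000 in
theorem pvCat_eq (s : String) :
    pvCatTable.getD s "GENERIC" =
      if s = "cdb" ∨ s = "lci" ∨ s = "lca" ∨ s = "bond" ∨ s = "treasury" then "RENDA_FIXA"
      else if s = "previdencia" then "PREVIDENCIA"
      else if s = "stock" ∨ s = "fii" ∨ s = "etf" ∨ s = "bdr" then "RENDA_VARIAVEL"
      else if s = "crypto" then "CRIPTO"
      else if s = "stock_us" ∨ s = "etf_us" ∨ s = "reit_us" ∨ s = "bdr_us" then "INTERNACIONAL"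
      else "GENERIC" := by
  rw [PySem.Dict.getD_eq_get?_getD, pvCatTable_mk]
  simp only [PySem.Dict.get?_mk_cons, beq_iff_eq]
  by_cases h0 : "cdb" = s
  · subst h0; rfl
  by_cases h1 : "lci" = s
  · subst h1; rfl
  by_cases h2 : "lca" = s
  · subst h2; rfl
  by_cases h3 : "bond" = s
  · subst h3; rfl
  by_cases h4 : "treasury" = s
  · subst h4; rfl
  by_cases h5 : "previdencia" = s
  · subst h5; rfl
  by_cases h6 : "stock" = s
  · subst h6; rfl
  by_cases h7 : "fii" = s
  · subst h7; rfl
  by_cases h8 : "etf" = s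
  · subst h8; rfl
  by_cases h9 : "bdr" = s
  · subst h9; rfl
  by_cases h10 : "crypto" = s
  · subst h10; rfl
  by_cases h11 : "stock_us" = s
  · subst h11; rfl
  by_cases h12 : "etf_us" = s
  · subst h12; rfl
  by_cases h13 : "reit_us" = s
  · subst h13; rfl
  by_cases h14 : "bdr_us" = s
  · subst h14; rfl
  simp_all [eq_comm]
  rfl

-- a Nodup list whose members are all c, containing c, is [c]
theorem pv_nodup_all_eq {α : Type} (m : List α) (c : α) (hnd : m.Nodup)
    (hall : ∀ x ∈ m, x = c) (hc : c ∈ m) : m = [c] := by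
  cases m with
  | nil => cases hc
  | cons y t =>
    have hy : y = c := hall y (List.mem_cons_self)
    have ht : t = [] := by
      cases t with
      | nil => rfl
      | cons z t' =>
        have hz : z = c := hall z (by simp)
        subst hy hz
        simp at hnd
    simp [hy, ht]

theorem pv_ofList_singleton {α : Type} [BEq α] [LawfulBEq α] (m : List α) (c : α) :
    PySem.Set.ofList m = [c] ↔ (m ≠ [] ∧ ∀ x ∈ m, x = c) := by
  constructor
  · intro h
    constructor
    · intro hm; subst hm; simp [PySem.Set.ofList_nil] at h
    · intro x hx
      have : x ∈ PySem.Set.ofList m := (PySem.Set.mem_ofList _ _).2 hx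
      rw [h] at this; simpa using this
  · rintro ⟨hne, hall⟩
    have hc : c ∈ m := by
      cases m with
      | nil => exact absurd rfl hne
      | cons y t => have := hall y List.mem_cons_self; subst this; exact List.mem_cons_self
    exact pv_nodup_all_eq _ _ (PySem.Set.nodup_ofList m)
      (fun x hx => hall x ((PySem.Set.mem_ofList _ _).1 hx))
      ((PySem.Set.mem_ofList _ _).2 hc)




theorem mem_iff_cat_RF (s : String) :
    s ∈ ["cdb", "lci", "lca", "bond", "treasury"] ↔ pvCatTable.getD s "GENERIC" = "RENDA_FIXA" := by
  rw [pvCat_eq]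
  split_ifs <;>
    (try obtain rfl | rfl | rfl | rfl | rfl := ‹_ ∨ _ ∨ _ ∨ _ ∨ _›) <;>
    (try obtain rfl | rfl | rfl | rfl := ‹_ ∨ _ ∨ _ ∨ _›) <;> simp_all

theorem mem_iff_cat_PREV (s : String) :
    s ∈ ["previdencia"] ↔ pvCatTable.getD s "GENERIC" = "PREVIDENCIA" := by
  rw [pvCat_eq]
  split_ifs <;>
    (try obtain rfl | rfl | rfl | rfl | rfl := ‹_ ∨ _ ∨ _ ∨ _ ∨ _›) <;>
    (try obtain rfl | rfl | rfl | rfl := ‹_ ∨ _ ∨ _ ∨ _›) <;> simp_all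

theorem mem_iff_cat_RV (s : String) :
    s ∈ ["stock", "fii", "etf", "bdr"] ↔ pvCatTable.getD s "GENERIC" = "RENDA_VARIAVEL" := by
  rw [pvCat_eq]
  split_ifs <;>
    (try obtain rfl | rfl | rfl | rfl | rfl := ‹_ ∨ _ ∨ _ ∨ _ ∨ _›) <;>
    (try obtain rfl | rfl | rfl | rfl := ‹_ ∨ _ ∨ _ ∨ _›) <;> simp_all

theorem mem_iff_cat_CRIPTO (s : String) :
    s ∈ ["crypto"] ↔ pvCatTable.getD s "GENERIC" = "CRIPTO" := by
  rw [pvCat_eq]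
  split_ifs <;>
    (try obtain rfl | rfl | rfl | rfl | rfl := ‹_ ∨ _ ∨ _ ∨ _ ∨ _›) <;>
    (try obtain rfl | rfl | rfl | rfl := ‹_ ∨ _ ∨ _ ∨ _›) <;> simp_all

theorem mem_iff_cat_INTL (s : String) :
    s ∈ ["stock_us", "etf_us", "reit_us", "bdr_us"] ↔ pvCatTable.getD s "GENERIC" = "INTERNACIONAL" := by
  rw [pvCat_eq]
  split_ifs <;>
    (try obtain rfl | rfl | rfl | rfl | rfl := ‹_ ∨ _ ∨ _ ∨ _ ∨ _›) <;>
    (try obtain rfl | rfl | rfl | rfl := ‹_ ∨ _ ∨ _ ∨ _›) <;> simp_all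

theorem cat_cases (s : String) :
    pvCatTable.getD s "GENERIC" = "GENERIC" ∨ pvCatTable.getD s "GENERIC" = "RENDA_FIXA" ∨
    pvCatTable.getD s "GENERIC" = "PREVIDENCIA" ∨ pvCatTable.getD s "GENERIC" = "RENDA_VARIAVEL" ∨
    pvCatTable.getD s "GENERIC" = "CRIPTO" ∨ pvCatTable.getD s "GENERIC" = "INTERNACIONAL" := by
  rw [pvCat_eq]; split_ifs <;> simp

-- subset test on the normalized set ↔ the category multiset is the singleton [C]
theorem pv_key (N : List String) (hne : N ≠ []) (S : List String) (C : String)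
    (hSC : ∀ s, s ∈ S ↔ pvCatTable.getD s "GENERIC" = C) :
    PySem.Set.issubset (PySem.Set.ofList N) (PySem.Set.ofList S) = true ↔
      PySem.Set.ofList (N.map (fun s => pvCatTable.getD s "GENERIC")) = [C] := by
  rw [PySem.Set.issubset_iff, pv_ofList_singleton]
  constructor
  · intro h
    refine ⟨by simpa using hne, ?_⟩
    intro y hy
    rcases List.mem_map.1 hy with ⟨x, hx, rfl⟩
    exact (hSC x).1 (by simpa using h x ((PySem.Set.mem_ofList _ _).2 hx))
  · rintro ⟨-, hall⟩ x hx
    have hx' : x ∈ N := (PySem.Set.mem_ofList _ _).1 hx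
    have := hall _ (List.mem_map.2 ⟨x, hx', rfl⟩)
    exact (PySem.Set.mem_ofList _ _).2 ((hSC x).2 this)

theorem pv_main (N : List String) :
    (if (PySem.Set.ofList N).isEmpty then "GENERIC"
     else if PySem.Set.issubset (PySem.Set.ofList N) (PySem.Set.ofList ["cdb", "lci", "lca", "bond", "treasury"]) then "RENDA_FIXA"
     else if PySem.Set.issubset (PySem.Set.ofList N) (PySem.Set.ofList ["previdencia"]) then "PREVIDENCIA"
     else if PySem.Set.issubset (PySem.Set.ofList N) (PySem.Set.ofList ["stock", "fii", "etf", "bdr"]) then "RENDA_VARIAVEL"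
     else if PySem.Set.issubset (PySem.Set.ofList N) (PySem.Set.ofList ["crypto"]) then "CRIPTO"
     else if PySem.Set.issubset (PySem.Set.ofList N) (PySem.Set.ofList ["stock_us", "etf_us", "reit_us", "bdr_us"]) then "INTERNACIONAL"
     else "GENERIC")
    = (match PySem.Set.ofList (N.map (fun s => pvCatTable.getD s "GENERIC")) with
       | [c] => c
       | _ => "GENERIC") := by
  by_cases hN : N = []
  · subst hN; rfl
  · have hne : ¬ ((PySem.Set.ofList N).isEmpty = true) := by
      cases N with
      | nil => exact absurd rfl hN
      | cons a t => simp [PySem.Set.ofList_cons]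
    rw [if_neg hne]
    have k1 := pv_key N hN _ _ mem_iff_cat_RF
    have k2 := pv_key N hN _ _ mem_iff_cat_PREV
    have k3 := pv_key N hN _ _ mem_iff_cat_RV
    have k4 := pv_key N hN _ _ mem_iff_cat_CRIPTO
    have k5 := pv_key N hN _ _ mem_iff_cat_INTL
    by_cases h1 : PySem.Set.issubset (PySem.Set.ofList N) (PySem.Set.ofList ["cdb", "lci", "lca", "bond", "treasury"]) = true
    · rw [if_pos h1, k1.1 h1]
    rw [if_neg h1]
    by_cases h2 : PySem.Set.issubset (PySem.Set.ofList N) (PySem.Set.ofList ["previdencia"]) = true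
    · rw [if_pos h2, k2.1 h2]
    rw [if_neg h2]
    by_cases h3 : PySem.Set.issubset (PySem.Set.ofList N) (PySem.Set.ofList ["stock", "fii", "etf", "bdr"]) = true
    · rw [if_pos h3, k3.1 h3]
    rw [if_neg h3]
    by_cases h4 : PySem.Set.issubset (PySem.Set.ofList N) (PySem.Set.ofList ["crypto"]) = true
    · rw [if_pos h4, k4.1 h4]
    rw [if_neg h4]
    by_cases h5 : PySem.Set.issubset (PySem.Set.ofList N) (PySem.Set.ofList ["stock_us", "etf_us", "reit_us", "bdr_us"]) = true
    · rw [if_pos h5, k5.1 h5]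
    rw [if_neg h5]
    rcases hc : PySem.Set.ofList (N.map (fun s => pvCatTable.getD s "GENERIC")) with - | ⟨c, - | ⟨c2, t⟩⟩
    · rfl
    · -- the category set is the singleton [c]: show c must be "GENERIC"
      obtain ⟨-, hall⟩ := (pv_ofList_singleton _ c).1 hc
      obtain ⟨x, hx⟩ : ∃ x, x ∈ N := by
        cases N with
        | nil => exact absurd rfl hN
        | cons a t => exact ⟨a, List.mem_cons_self⟩
      have hcx : pvCatTable.getD x "GENERIC" = c :=
        hall _ (List.mem_map.2 ⟨x, hx, rfl⟩)
      rcases cat_cases x with h | h | h | h | h | h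
      · rw [hcx] at h; rw [h]
      · exact absurd (k1.2 (by rw [hc, ← hcx, h])) h1
      · exact absurd (k2.2 (by rw [hc, ← hcx, h])) h2
      · exact absurd (k3.2 (by rw [hc, ← hcx, h])) h3
      · exact absurd (k4.2 (by rw [hc, ← hcx, h])) h4
      · exact absurd (k5.2 (by rw [hc, ← hcx, h])) h5
    · rfl

-- ===== VERDICT (by name: the statement is the Claim_ definition above) =====
theorem portfolio_specialization_py_spec : Claim_equal_portfolio_specialization_py := by
  intro l _
  show portfolio_specialization_py l = portfolio_specialization_py_alt l
  unfold portfolio_specialization_py portfolio_specialization_py_alt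
  have hmap : l.map (fun t => pvCatTable.getD (PySem.Str.lower (PySem.Str.strip t)) "GENERIC")
      = (l.map (fun t => PySem.Str.lower (PySem.Str.strip t))).map (fun s => pvCatTable.getD s "GENERIC") := by
    simp [Function.comp]
  simp only [hmap]
  exact pv_main _
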